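-- pv_equiv track=rewrite | github.com/owid/etl | etl/version_tracker.py | _recursive_get_all_step_dependencies_ndim
-- ===== SOURCE A (Python) =====
-- from typing import Any, Dict, List, Optional, Set, Tuple
--
-- def _recursive_get_all_step_dependencies_ndim(
--     dag: Dict[str, Any], step: str, memo: Dict[str, Set[str]]
-- ) -> Tuple[Set[str], Dict[str, Set[str]]]:
--     """Optimised version of `_recursive_get_all_step_dependencies` using `memo` to store already computed dependencies."""
--     if step in memo:
--         # Return already computed dependencies immediately
--         return memo[step], memo
--
--     dependencies = set()
--     if step in dag:
--         substeps = dag[step]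
--         # Update dependencies by adding the substeps
--         dependencies.update(substeps)
--         # Recursively gather dependencies for each substep
--         for substep in substeps:
--             _dependencies, memo = _recursive_get_all_step_dependencies_ndim(dag, substep, memo)
--             dependencies.update(_dependencies)
--
--     # Store the computed dependencies in memo before returning
--     memo[step] = dependencies
--     return dependencies, memo
-- ===== SOURCE B (Python) =====
-- def _recursive_get_all_step_dependencies_ndim(dag, step, memo):
--     """Iterative explicit-stack post-order DFS; memo is populated per node, and each
--     node's dependency set is recomputed from the memoized substeps at finalization."""
--     if step in memo:
--         return memo[step], memo
--     stack = [(step, 0)]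
--     while stack:
--         node, i = stack.pop()
--         substeps = dag.get(node, [])
--         while i < len(substeps) and substeps[i] in memo:
--             i += 1
--         if i < len(substeps):
--             stack.append((node, i + 1))
--             stack.append((substeps[i], 0))
--         else:
--             deps = set(substeps)
--             for s in substeps:
--                 deps |= memo[s]
--             memo[node] = deps
--     return memo[step], memo
-- ===== Notes on version B (the rewrite author's own statement) =====
-- stated objective: alternative
-- what changed: The recursive memoized DFS threading (dependencies, memo) through return values is replaced by an iterative post-order DFS over an explicit (node, next-substep-index) stack that only populates memo, with each node's dependency set recomputed from its already-memoized substeps at finalization; the answer is then read off memo.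
import Mathlib
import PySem

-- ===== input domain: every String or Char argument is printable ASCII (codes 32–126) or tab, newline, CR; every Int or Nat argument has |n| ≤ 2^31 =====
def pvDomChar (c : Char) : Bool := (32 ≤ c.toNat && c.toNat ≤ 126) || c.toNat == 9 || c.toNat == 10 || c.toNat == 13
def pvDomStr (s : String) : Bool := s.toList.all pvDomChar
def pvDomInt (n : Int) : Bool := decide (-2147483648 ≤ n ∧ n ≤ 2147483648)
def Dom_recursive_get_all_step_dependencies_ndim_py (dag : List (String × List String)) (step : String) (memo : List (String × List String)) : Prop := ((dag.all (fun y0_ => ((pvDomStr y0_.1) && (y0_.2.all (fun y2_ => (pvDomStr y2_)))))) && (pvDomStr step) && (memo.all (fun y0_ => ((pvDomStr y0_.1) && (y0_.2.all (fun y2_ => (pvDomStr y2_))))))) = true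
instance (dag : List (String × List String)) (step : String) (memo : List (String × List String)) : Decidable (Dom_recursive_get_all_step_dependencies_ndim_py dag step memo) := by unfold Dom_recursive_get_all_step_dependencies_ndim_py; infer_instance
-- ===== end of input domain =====

-- B replaces A's memoized recursion (threading (dependencies, memo) through returns) by an
-- iterative post-order DFS over an explicit (node, next-substep-index) stack that only populates
-- memo, recomputing each node's dependency set from its memoized substeps at finalization
-- (objective: alternative). Both Pythons mutate `memo` in place identically; the equivalence
-- proved here is about the return value.



-- ===== PORT A =====
-- The Nat fuel is a totalization artifact for A's unbounded recursion (Python raises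
-- RecursionError on inputs outside Pre_); on exhaustion the node is memoized with its
-- direct substeps plus the already-memoized substep dependencies.
-- set-building step shared by both Pythons: start from the substeps, then union in lists
def pvOneLevelDeps (memo : PySem.Dict String (List String)) (subs : List String) : List String :=
  subs.foldl (fun d s => PySem.Set.update d (memo.getD s [])) (PySem.Set.ofList subs)

def pvARec (dag : PySem.Dict String (List String)) :
    Nat → String → PySem.Dict String (List String) →
    List String × PySem.Dict String (List String)
  | 0, step, memo =>
    match memo.get? step with
    | some v => (v, memo)
    | none =>
      let deps := pvOneLevelDeps memo (dag.getD step [])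
      (deps, memo.insert step deps)
  | n + 1, step, memo =>
    match memo.get? step with
    | some v => (v, memo)
    | none =>
      match dag.get? step with
      | none => ([], memo.insert step [])
      | some substeps =>
        let r := substeps.foldl
          (fun (acc : List String × PySem.Dict String (List String)) sub =>
            let r' := pvARec dag n sub acc.2
            (PySem.Set.update acc.1 r'.1, r'.2))
          (PySem.Set.ofList substeps, memo)
        (r.1, r.2.insert step r.1)

def recursive_get_all_step_dependencies_ndim_py (dag : List (String × List String)) (step : String) (memo : List (String × List String)) : List String × (List (String × List String)) :=
  let r := pvARec (PySem.Dict.ofList dag) (dag.length + 2) step (PySem.Dict.ofList memo)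
  (r.1, r.2.items)

-- ===== PORT B =====
-- Port of Source B: explicit-stack machine. Frames are (node, next substep index, fuel);
-- the per-frame fuel is the same totalization artifact as port A's recursion fuel.
-- Source B finalization: deps = set(substeps); then deps |= memo[s] for each substep
def pvFinalizeDeps (memo : PySem.Dict String (List String)) (subs : List String) : List String :=
  subs.foldl (fun d s => PySem.Set.union d (memo.getD s [])) (PySem.Set.ofList subs)

def pvSkip (memo : PySem.Dict String (List String)) (subs : List String) (i : Nat) : Nat :=
  if h : i < subs.length then
    if memo.contains (subs[i]'h) then pvSkip memo subs (i + 1) else i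
  else i
termination_by subs.length - i

lemma pvSkip_ge (memo : PySem.Dict String (List String)) (subs : List String) (i : Nat) :
    i ≤ pvSkip memo subs i := by
  fun_induction pvSkip memo subs i <;> omega

def pvX (dag : PySem.Dict String (List String)) : Nat :=
  (dag.values.map List.length).sum + 3

lemma pvLen_lt_X (dag : PySem.Dict String (List String)) (node : String) :
    (dag.getD node []).length + 3 ≤ pvX dag := by
  unfold pvX
  cases hg : dag.get? node with
  | none => rw [PySem.Dict.getD_of_get?_eq_none _ _ hg]; simp
  | some v =>
    rw [PySem.Dict.getD_of_get?_eq_some _ _ hg]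
    have hv : v ∈ dag.values := by
      have := PySem.Dict.mem_items_of_get?_eq_some _ hg
      exact List.mem_map_of_mem this
    have : v.length ≤ (dag.values.map List.length).sum :=
      List.single_le_sum (by intro x _; omega) _ (List.mem_map_of_mem hv)
    omega

lemma pvMeasure_push {Lc L i j X m S : Nat} (hij : i ≤ j) (hjL : j < L) (hX : Lc + 3 ≤ X) :
    (Lc + 1 - 0 + 1) * X ^ m + ((L + 1 - (j + 1) + 1) * X ^ (m + 1) + S) <
      (L + 1 - i + 1) * X ^ (m + 1) + S := by
  have hXm : 0 < X ^ m := Nat.one_le_pow _ _ (by omega)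
  have h1 : (Lc + 1 - 0 + 1) * X ^ m < X ^ (m + 1) := by
    rw [pow_succ]
    calc (Lc + 1 - 0 + 1) * X ^ m < X * X ^ m :=
          Nat.mul_lt_mul_of_pos_right (by omega) hXm
      _ = X ^ m * X := Nat.mul_comm _ _
  have h2 : (L + 1 - (j + 1) + 1) * X ^ (m + 1) + X ^ (m + 1) ≤ (L + 1 - i + 1) * X ^ (m + 1) := by
    have hstep : (L + 1 - (j + 1) + 1) + 1 ≤ L + 1 - i + 1 := by omega
    calc (L + 1 - (j + 1) + 1) * X ^ (m + 1) + X ^ (m + 1)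
        = ((L + 1 - (j + 1) + 1) + 1) * X ^ (m + 1) := by ring
      _ ≤ (L + 1 - i + 1) * X ^ (m + 1) := Nat.mul_le_mul_right _ hstep
  omega

lemma pvMeasure_pop {L i X g S : Nat} (hX : L + 3 ≤ X) :
    S < (L + 1 - i + 1) * X ^ g + S := by
  have h1 : 0 < X ^ g := Nat.one_le_pow _ _ (by omega)
  have h2 : 1 ≤ (L + 1 - i + 1) * X ^ g := by
    have := Nat.mul_le_mul (show 1 ≤ L + 1 - i + 1 by omega) (show 1 ≤ X ^ g from h1)
    simpa using this
  omega

def pvWt (dag : PySem.Dict String (List String)) (f : String × Nat × Nat) : Nat :=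
  (((dag.getD f.1 []).length + 1 - f.2.1) + 1) * pvX dag ^ f.2.2

def pvM (dag : PySem.Dict String (List String)) (stack : List (String × Nat × Nat)) : Nat :=
  (stack.map (pvWt dag)).sum

def pvBLoop (dag : PySem.Dict String (List String)) :
    List (String × Nat × Nat) → PySem.Dict String (List String) →
    PySem.Dict String (List String)
  | [], memo => memo
  | (node, i, g) :: rest, memo =>
    if h : pvSkip memo (dag.getD node []) i < (dag.getD node []).length ∧ g ≠ 0 then
      pvBLoop dag
        (((dag.getD node [])[pvSkip memo (dag.getD node []) i]'h.1, 0, g - 1)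
          :: (node, pvSkip memo (dag.getD node []) i + 1, g) :: rest) memo
    else
      pvBLoop dag rest (memo.insert node (pvFinalizeDeps memo (dag.getD node [])))
termination_by stack _ => pvM dag stack
decreasing_by
  · obtain ⟨hj, hg⟩ := h
    have hij := pvSkip_ge memo (dag.getD node []) i
    obtain ⟨m, rfl⟩ : ∃ m, g = m + 1 := ⟨g - 1, by omega⟩
    have hXc := pvLen_lt_X dag ((dag.getD node [])[pvSkip memo (dag.getD node []) i]'hj)
    simp only [pvM, List.map_cons, List.sum_cons, pvWt, Nat.add_sub_cancel]
    exact pvMeasure_push hij hj hXc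
  · simp only [pvM, List.map_cons, List.sum_cons, pvWt]
    exact pvMeasure_pop (pvLen_lt_X dag node)

def recursive_get_all_step_dependencies_ndim_py_alt (dag : List (String × List String)) (step : String) (memo : List (String × List String)) : List String × (List (String × List String)) :=
  match (PySem.Dict.ofList memo).get? step with
  | some v => (v, (PySem.Dict.ofList memo).items)
  | none =>
    let m := pvBLoop (PySem.Dict.ofList dag) [(step, 0, dag.length + 2)] (PySem.Dict.ofList memo)
    (m.getD step [], m.items)

-- ===== PRECONDITION & SPEC =====
def pvMemoKeys (memo : List (String × List String)) : List String := memo.map (·.1)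

-- neighbours of a node in the dependency graph restricted to not-yet-memoized nodes
def pvNbrs (dag memo : List (String × List String)) (a : String) : List String :=
  if (pvMemoKeys memo).contains a then []
  else ((PySem.Dict.ofList dag).getD a []).filter (fun b => !(pvMemoKeys memo).contains b)

def pvReachStep (dag memo : List (String × List String)) (S : List String) : List String :=
  PySem.Set.update S (S.flatMap (pvNbrs dag memo))

def pvReach (dag memo : List (String × List String)) (a : String) : List String :=
  (pvReachStep dag memo)^[dag.length + 1] (PySem.Set.ofList (pvNbrs dag memo a))

-- nodes reachable from `step` through not-yet-memoized nodes (step itself if unmemoized)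
def pvReachFrom (dag memo : List (String × List String)) (step : String) : List String :=
  (pvReachStep dag memo)^[dag.length + 1]
    (PySem.Set.ofList (if (pvMemoKeys memo).contains step then [] else [step]))

-- Pre_ requires that no cycle of not-yet-memoized nodes is reachable from `step`: on exactly
-- those inputs the Python A recurses forever through the cycle (RecursionError).
def Pre_recursive_get_all_step_dependencies_ndim_py (dag : List (String × List String)) (step : String) (memo : List (String × List String)) : Prop :=
  ∀ a ∈ pvReachFrom dag memo step, (pvMemoKeys memo).contains a = false → a ∉ pvReach dag memo a
instance (dag : List (String × List String)) (step : String) (memo : List (String × List String)) : Decidable (Pre_recursive_get_all_step_dependencies_ndim_py dag step memo) := by unfold Pre_recursive_get_all_step_dependencies_ndim_py; infer_instance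

def pvWitness_recursive_get_all_step_dependencies_ndim_py : (List (String × List String)) × String × (List (String × List String)) :=
  ([("a", ["b"]), ("b", [])], "a", [("c", ["d"])])

def Spec_recursive_get_all_step_dependencies_ndim_py (dag : List (String × List String)) (step : String) (memo : List (String × List String)) (out : List String × (List (String × List String))) : Prop := out = recursive_get_all_step_dependencies_ndim_py_alt dag step memo
instance (dag : List (String × List String)) (step : String) (memo : List (String × List String)) (out : List String × (List (String × List String))) : Decidable (Spec_recursive_get_all_step_dependencies_ndim_py dag step memo out) := by unfold Spec_recursive_get_all_step_dependencies_ndim_py; infer_instance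

-- ===== CLAIM (what is proved, stated in full; the proofs are below) =====
def Claim_equal_recursive_get_all_step_dependencies_ndim_py : Prop := ∀ (dag : List (String × List String)) (step : String) (memo : List (String × List String)), Dom_recursive_get_all_step_dependencies_ndim_py dag step memo → Pre_recursive_get_all_step_dependencies_ndim_py dag step memo → Spec_recursive_get_all_step_dependencies_ndim_py dag step memo (recursive_get_all_step_dependencies_ndim_py dag step memo)

-- ===== LEMMAS AND PROOFS =====
-- The two ports agree on EVERY input (the fuel-exhaustion conventions coincide); Pre_ marks
-- where the Python A actually returns, the proof of the claim does not need it.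

lemma pvWitness_holds :
    Dom_recursive_get_all_step_dependencies_ndim_py (pvWitness_recursive_get_all_step_dependencies_ndim_py.1) (pvWitness_recursive_get_all_step_dependencies_ndim_py.2.1) (pvWitness_recursive_get_all_step_dependencies_ndim_py.2.2) ∧
    Pre_recursive_get_all_step_dependencies_ndim_py (pvWitness_recursive_get_all_step_dependencies_ndim_py.1) (pvWitness_recursive_get_all_step_dependencies_ndim_py.2.1) (pvWitness_recursive_get_all_step_dependencies_ndim_py.2.2) := by
  constructor <;> decide

-- the memo evolution of A's recursion, reformulated index-free (proof-side only)
def pvProc (dag : PySem.Dict String (List String)) :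
    Nat → String → Nat → PySem.Dict String (List String) → PySem.Dict String (List String)
  | 0, node, _, m => m.insert node (pvOneLevelDeps m (dag.getD node []))
  | n + 1, node, i, m =>
    let m' := ((dag.getD node []).drop i).foldl (fun m s => (pvARec dag n s m).2) m
    m'.insert node (pvOneLevelDeps m' (dag.getD node []))

lemma pvARec_memoized (dag : PySem.Dict String (List String)) (n : Nat) (s : String)
    (m : PySem.Dict String (List String)) {v : List String} (h : m.get? s = some v) :
    pvARec dag n s m = (v, m) := by
  cases n <;> simp [pvARec, h]

lemma pvARec_pers (dag : PySem.Dict String (List String)) :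
    ∀ (n : Nat) (s : String) (m : PySem.Dict String (List String)) (k : String) (v : List String),
      m.get? k = some v → ((pvARec dag n s m).2).get? k = some v := by
  intro n
  induction n with
  | zero =>
    intro s m k v h
    cases hg : m.get? s with
    | some w => simp [pvARec, hg, h]
    | none =>
      have hks : k ≠ s := by intro e; subst e; rw [h] at hg; cases hg
      simp only [pvARec, hg]
      rw [PySem.Dict.get?_insert_of_ne _ _ hks]
      exact h
  | succ n ih =>
    intro s m k v h
    cases hg : m.get? s with
    | some w => simp [pvARec, hg, h]
    | none =>
      have hks : k ≠ s := by intro e; subst e; rw [h] at hg; cases hg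
      cases hd : dag.get? s with
      | none =>
        simp only [pvARec, hg, hd]
        rw [PySem.Dict.get?_insert_of_ne _ _ hks]
        exact h
      | some subs =>
        simp only [pvARec, hg, hd]
        rw [PySem.Dict.get?_insert_of_ne _ _ hks]
        have hfold : ∀ (l : List String) (acc : List String × PySem.Dict String (List String)),
            acc.2.get? k = some v →
            ((l.foldl (fun (acc : List String × PySem.Dict String (List String)) sub =>
                let r' := pvARec dag n sub acc.2
                (PySem.Set.update acc.1 r'.1, r'.2)) acc)).2.get? k = some v := by
          intro l
          induction l with
          | nil => intro acc hacc; exact hacc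
          | cons x t iht =>
            intro acc hacc
            exact iht _ (ih x acc.2 k v hacc)
        exact hfold subs (PySem.Set.ofList subs, m) h

lemma pvFoldSnd (dag : PySem.Dict String (List String)) (n : Nat) :
    ∀ (l : List String) (d : List String) (m : PySem.Dict String (List String)),
      (l.foldl (fun (acc : List String × PySem.Dict String (List String)) sub =>
          let r' := pvARec dag n sub acc.2
          (PySem.Set.update acc.1 r'.1, r'.2)) (d, m)).2
        = l.foldl (fun m s => (pvARec dag n s m).2) m := by
  intro l
  induction l with
  | nil => intro d m; rfl
  | cons x t iht =>
    intro d m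
    simp only [List.foldl_cons]
    exact iht _ _

lemma pvFold_pers (dag : PySem.Dict String (List String)) (n : Nat) (l : List String)
    (m : PySem.Dict String (List String)) (k : String) (v : List String)
    (h : m.get? k = some v) :
    (l.foldl (fun m s => (pvARec dag n s m).2) m).get? k = some v := by
  induction l generalizing m with
  | nil => exact h
  | cons x t iht => exact iht _ (pvARec_pers dag n x m k v h)

lemma pvARec_compl (dag : PySem.Dict String (List String)) (n : Nat) (s : String)
    (m : PySem.Dict String (List String)) :
    ((pvARec dag n s m).2).get? s = some (pvARec dag n s m).1 := by
  cases n with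
  | zero =>
    cases hg : m.get? s with
    | some w => simp [pvARec, hg]
    | none => simp [pvARec, hg, PySem.Dict.get?_insert_self]
  | succ n =>
    cases hg : m.get? s with
    | some w => simp [pvARec, hg]
    | none =>
      cases hd : dag.get? s with
      | none => simp [pvARec, hg, hd, PySem.Dict.get?_insert_self]
      | some subs => simp [pvARec, hg, hd, PySem.Dict.get?_insert_self]

lemma pvFold_fst (dag : PySem.Dict String (List String)) (n : Nat) :
    ∀ (l : List String) (d : List String) (m : PySem.Dict String (List String)),
      (l.foldl (fun (acc : List String × PySem.Dict String (List String)) sub =>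
          let r' := pvARec dag n sub acc.2
          (PySem.Set.update acc.1 r'.1, r'.2)) (d, m)).1
        = l.foldl (fun dd s =>
            PySem.Set.update dd ((l.foldl (fun m s => (pvARec dag n s m).2) m).getD s [])) d := by
  intro l
  induction l with
  | nil => intro d m; rfl
  | cons x t iht =>
    intro d m
    simp only [List.foldl_cons]
    rw [iht]
    have h1 := pvARec_compl dag n x m
    have h2 := pvFold_pers dag n t _ x _ h1
    rw [PySem.Dict.getD_of_get?_eq_some _ _ h2]

lemma pvBridge (dag : PySem.Dict String (List String)) (g : Nat) (node : String)
    (m : PySem.Dict String (List String)) (h : m.get? node = none) :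
    pvProc dag g node 0 m = (pvARec dag g node m).2 := by
  cases g with
  | zero => simp [pvProc, pvARec, h]
  | succ n =>
    cases hd : dag.get? node with
    | none =>
      have hgd : dag.getD node [] = [] := PySem.Dict.getD_of_get?_eq_none _ _ hd
      simp [pvProc, pvARec, h, hd, hgd, pvOneLevelDeps, PySem.Set.ofList]
    | some subs =>
      have hgd : dag.getD node [] = subs := PySem.Dict.getD_of_get?_eq_some _ _ hd
      simp only [pvProc, pvARec, h, hd, hgd, List.drop_zero]
      rw [pvFoldSnd dag n subs, pvFold_fst dag n subs]
      rfl

lemma pvSkip_le_length (memo : PySem.Dict String (List String)) (subs : List String) (i : Nat)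
    (h : i ≤ subs.length) : pvSkip memo subs i ≤ subs.length := by
  fun_induction pvSkip memo subs i <;> omega

lemma pvSkip_stop (memo : PySem.Dict String (List String)) (subs : List String) (i : Nat) :
    ∀ c, subs[pvSkip memo subs i]? = some c → memo.contains c = false := by
  fun_induction pvSkip memo subs i with
  | case1 i h hc ih => exact ih
  | case2 i h hc =>
    intro c hc2
    rw [List.getElem?_eq_getElem h] at hc2
    cases hc2
    simpa using hc
  | case3 i h =>
    intro c hc2
    rw [List.getElem?_eq_none (by omega)] at hc2
    cases hc2

lemma pvSkipFold (dag : PySem.Dict String (List String)) (n : Nat)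
    (memo : PySem.Dict String (List String)) (subs : List String) (i : Nat) :
    (subs.drop i).foldl (fun m s => (pvARec dag n s m).2) memo
      = (subs.drop (pvSkip memo subs i)).foldl (fun m s => (pvARec dag n s m).2) memo := by
  fun_induction pvSkip memo subs i with
  | case1 i h hc ih =>
    rw [List.drop_eq_getElem_cons h]
    simp only [List.foldl_cons]
    rw [PySem.Dict.contains_eq_isSome_get?] at hc
    obtain ⟨v, hv⟩ := Option.isSome_iff_exists.mp hc
    rw [pvARec_memoized dag n _ _ hv]
    exact ih
  | case2 i h hc => rfl
  | case3 i h => rfl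

lemma pvRun (dag : PySem.Dict String (List String)) :
    ∀ (g : Nat) (node : String) (i : Nat) (rest : List (String × Nat × Nat))
      (m : PySem.Dict String (List String)), i ≤ (dag.getD node []).length →
      pvBLoop dag ((node, i, g) :: rest) m = pvBLoop dag rest (pvProc dag g node i m) := by
  intro g
  induction g with
  | zero =>
    intro node i rest m hi
    rw [pvBLoop]
    simp [pvProc, pvFinalizeDeps, pvOneLevelDeps, PySem.Set.union]
  | succ n ihg =>
    suffices H : ∀ (k i : Nat) (node : String) (rest : List (String × Nat × Nat))
        (m : PySem.Dict String (List String)),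
        (dag.getD node []).length - i ≤ k → i ≤ (dag.getD node []).length →
        pvBLoop dag ((node, i, n + 1) :: rest) m
          = pvBLoop dag rest (pvProc dag (n + 1) node i m) by
      intro node i rest m hi
      exact H ((dag.getD node []).length) i node rest m (by omega) hi
    intro k
    induction k with
    | zero =>
      intro i node rest m hk hi
      have hiL : i = (dag.getD node []).length := by omega
      rw [pvBLoop]
      have hj : pvSkip m (dag.getD node []) i = i := by
        rw [pvSkip]
        simp [hiL]
      rw [dif_neg (by rw [hj]; omega)]
      simp only [pvProc]
      rw [pvSkipFold dag n m _ i, hj, hiL, List.drop_length]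
      simp [List.foldl_nil, pvFinalizeDeps, pvOneLevelDeps, PySem.Set.union]
    | succ k ihk =>
      intro i node rest m hk hi
      rw [pvBLoop]
      by_cases hj : pvSkip m (dag.getD node []) i < (dag.getD node []).length
      · rw [dif_pos ⟨hj, Nat.succ_ne_zero n⟩]
        simp only [Nat.add_sub_cancel]
        have hij := pvSkip_ge m (dag.getD node []) i
        rw [ihg ((dag.getD node [])[pvSkip m (dag.getD node []) i]'hj) 0 _ m (Nat.zero_le _)]
        have hcnone : m.get? ((dag.getD node [])[pvSkip m (dag.getD node []) i]'hj) = none := by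
          have hcc := pvSkip_stop m (dag.getD node []) i _ (List.getElem?_eq_getElem hj)
          rw [PySem.Dict.contains_eq_isSome_get?] at hcc
          cases h' : m.get? ((dag.getD node [])[pvSkip m (dag.getD node []) i]'hj) with
          | none => rfl
          | some v => rw [h'] at hcc; simp at hcc
        rw [pvBridge dag n _ m hcnone]
        rw [ihk (pvSkip m (dag.getD node []) i + 1) node rest _ (by omega) (by omega)]
        congr 1
        simp only [pvProc]
        have hfold : ((dag.getD node []).drop i).foldl (fun m s => (pvARec dag n s m).2) m
            = ((dag.getD node []).drop (pvSkip m (dag.getD node []) i + 1)).foldl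
                (fun m s => (pvARec dag n s m).2)
                ((pvARec dag n ((dag.getD node [])[pvSkip m (dag.getD node []) i]'hj) m).2) := by
          rw [pvSkipFold dag n m _ i, List.drop_eq_getElem_cons hj]
          simp only [List.foldl_cons]
        rw [hfold]
      · rw [dif_neg (by intro hcon; exact hj hcon.1)]
        simp only [pvProc]
        have hjle := pvSkip_le_length m (dag.getD node []) i hi
        have hjL : pvSkip m (dag.getD node []) i = (dag.getD node []).length := by omega
        rw [pvSkipFold dag n m _ i, hjL, List.drop_length]
        simp [List.foldl_nil, pvFinalizeDeps, pvOneLevelDeps, PySem.Set.union]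

lemma pvMain (dag : List (String × List String)) (step : String) (memo : List (String × List String)) :
    recursive_get_all_step_dependencies_ndim_py dag step memo
      = recursive_get_all_step_dependencies_ndim_py_alt dag step memo := by
  unfold recursive_get_all_step_dependencies_ndim_py recursive_get_all_step_dependencies_ndim_py_alt
  cases hm : (PySem.Dict.ofList memo).get? step with
  | some v =>
    dsimp only
    rw [pvARec_memoized _ _ _ _ hm]
  | none =>
    dsimp only
    rw [pvRun (PySem.Dict.ofList dag) (dag.length + 2) step 0 [] (PySem.Dict.ofList memo)
        (Nat.zero_le _)]
    rw [pvBLoop]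
    rw [pvBridge _ _ _ _ hm]
    have hc := pvARec_compl (PySem.Dict.ofList dag) (dag.length + 2) step (PySem.Dict.ofList memo)
    rw [PySem.Dict.getD_of_get?_eq_some _ _ hc]

-- ===== VERDICT (by name: the statement is the Claim_ definition above) =====
theorem recursive_get_all_step_dependencies_ndim_py_spec : Claim_equal_recursive_get_all_step_dependencies_ndim_py := by
  intro dag step memo _ _
  unfold Spec_recursive_get_all_step_dependencies_ndim_py
  exact pvMain dag step memo
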